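-- pv_equiv track=rewrite | github.com/CornelioEmbedded/GUI_Horarios | src/intro.py | order_classes_by_day
-- ===== SOURCE A (Python) =====
-- def order_classes_by_day(list_dict):
--     list_135 = []
--     list_24 = []
--
--     for dict in list_dict:
--         if '135' in dict['Day']:
--             list_135.append(dict)
--         elif '2' in dict['Day'] or '4' in dict['Day']:
--             list_24.append(dict)
--     new_order = list_135 + list_24
--     return new_order
-- ===== SOURCE B (Python) =====
-- def order_classes_by_day(list_dict):
--     def rank(d):
--         day = d['Day']
--         if '135' in day:
--             return 0
--         if '2' in day or '4' in day:
--             return 1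
--         return 2
--     kept = [d for d in list_dict if rank(d) < 2]
--     return sorted(kept, key=rank)
-- ===== Notes on version B (the rewrite author's own statement) =====
-- stated objective: alternative
-- what changed: Replaces the single partitioning loop with two accumulator lists by assigning each dict a numeric category rank (0 for '135' days, 1 for '2'/'4' days, 2 otherwise), keeping ranks < 2 and stable-sorting by rank; stability makes the sorted order equal to A's concatenation.
import Mathlib
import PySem

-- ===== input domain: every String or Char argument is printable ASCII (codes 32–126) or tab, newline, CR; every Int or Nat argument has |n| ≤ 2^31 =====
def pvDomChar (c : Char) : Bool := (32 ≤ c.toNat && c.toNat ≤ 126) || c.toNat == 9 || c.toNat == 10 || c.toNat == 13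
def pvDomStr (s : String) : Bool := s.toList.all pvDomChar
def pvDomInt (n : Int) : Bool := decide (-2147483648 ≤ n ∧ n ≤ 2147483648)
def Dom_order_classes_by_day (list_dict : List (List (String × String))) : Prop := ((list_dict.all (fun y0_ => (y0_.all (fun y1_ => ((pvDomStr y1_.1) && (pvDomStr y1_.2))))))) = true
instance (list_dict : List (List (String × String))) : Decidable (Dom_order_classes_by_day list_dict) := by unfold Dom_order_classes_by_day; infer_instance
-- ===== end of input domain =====

-- B replaces A's one-pass two-accumulator partition by a rank (0/1/2) per dict, keeping ranks < 2 and stable-sorting by rank (alternative algorithm, same result by stability).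
-- ===== PORT A =====
-- dict['Day'] ported as Dict.getD "Day" ""; Pre_ guarantees the key exists, so the default is never read inside Pre_.
def pvDay (d : List (String × String)) : String := (PySem.Dict.mk d).getD "Day" ""

def order_classes_by_day (list_dict : List (List (String × String))) : List (List (String × String)) :=
  let st := list_dict.foldl (fun (st : List (List (String × String)) × List (List (String × String))) d =>
    if PySem.Str.isIn "135" (pvDay d) then (st.1 ++ [d], st.2)
    else if PySem.Str.isIn "2" (pvDay d) || PySem.Str.isIn "4" (pvDay d) then (st.1, st.2 ++ [d])
    else st) ([], [])
  st.1 ++ st.2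

-- ===== PORT B =====
def pvRank (d : List (String × String)) : Int :=
  if PySem.Str.isIn "135" (pvDay d) then 0
  else if PySem.Str.isIn "2" (pvDay d) || PySem.Str.isIn "4" (pvDay d) then 1
  else 2

def order_classes_by_day_alt (list_dict : List (List (String × String))) : List (List (String × String)) :=
  PySem.List.sorted (list_dict.filter (fun d => decide (pvRank d < 2))) pvRank false

-- ===== PRECONDITION & SPEC =====
-- Pre_ excludes dicts missing the key 'Day', on which Python A raises KeyError.
def Pre_order_classes_by_day (list_dict : List (List (String × String))) : Prop :=
  (list_dict.all (fun d => (PySem.Dict.mk d).contains "Day")) = true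
instance (list_dict : List (List (String × String))) : Decidable (Pre_order_classes_by_day list_dict) := by unfold Pre_order_classes_by_day; infer_instance

def pvWitness_order_classes_by_day : (List (List (String × String))) :=
  [[("Day", "135")], [("Day", "24")], [("Day", "x")]]

def Spec_order_classes_by_day (list_dict : List (List (String × String))) (out : List (List (String × String))) : Prop := out = order_classes_by_day_alt list_dict
instance (list_dict : List (List (String × String))) (out : List (List (String × String))) : Decidable (Spec_order_classes_by_day list_dict out) := by unfold Spec_order_classes_by_day; infer_instance

-- ===== CLAIM =====
def Claim_equal_order_classes_by_day : Prop := ∀ (list_dict : List (List (String × String))), Dom_order_classes_by_day list_dict → Pre_order_classes_by_day list_dict → Spec_order_classes_by_day list_dict (order_classes_by_day list_dict)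

-- ===== LEMMAS AND PROOFS =====
-- A's fold is the two filters concatenated.
theorem pv_fold_eq {α : Type} (p q : α → Bool) (l : List α) (a b : List α) :
    l.foldl (fun (st : List α × List α) d =>
      if p d then (st.1 ++ [d], st.2)
      else if q d then (st.1, st.2 ++ [d])
      else st) (a, b)
    = (a ++ l.filter p, b ++ l.filter (fun d => !p d && q d)) := by
  induction l generalizing a b with
  | nil => simp
  | cons d t ih =>
    simp only [List.foldl_cons, List.filter_cons]
    by_cases h1 : p d = true
    · simp only [h1, if_pos, Bool.not_true, Bool.false_and]
      rw [ih]; simp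
    · by_cases h2 : q d = true
      · simp only [h1, h2, if_neg, if_true, Bool.not_eq_true] at *
        simp only [Bool.not_false, Bool.true_and, if_true]
        rw [ih]; simp
      · simp only [Bool.not_eq_true] at h1 h2
        simp only [h1, h2, Bool.not_false, Bool.true_and]
        exact ih a b

-- inserting a rank-0 element into ones-only list puts it in front
theorem pv_insert_ones {α : Type} (key : α → Int) (x : α) (ys : List α)
    (hx : key x = 0) (hys : ∀ y ∈ ys, key y = 1) :
    PySem.List.insertBy (fun a b => decide (key a < key b)) x ys = x :: ys := by
  cases ys with
  | nil => rfl
  | cons y t =>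
    have hy : key y = 1 := hys y (by simp)
    simp [PySem.List.insertBy, hx, hy]

-- inserting a rank-0 element into zeros ++ ones lands after the zeros (stability)
theorem pv_insert_zeros_ones {α : Type} (key : α → Int) (x : α) (zs os : List α)
    (hx : key x = 0) (hzs : ∀ y ∈ zs, key y = 0) (hos : ∀ y ∈ os, key y = 1) :
    PySem.List.insertBy (fun a b => decide (key a < key b)) x (zs ++ os) = zs ++ x :: os := by
  induction zs with
  | nil => simpa using pv_insert_ones key x os hx hos
  | cons z t ih =>
    have hz : key z = 0 := hzs z (by simp)
    simp only [List.cons_append]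
    rw [show PySem.List.insertBy (fun a b => decide (key a < key b)) x (z :: (t ++ os))
        = z :: PySem.List.insertBy (fun a b => decide (key a < key b)) x (t ++ os) by
      simp [PySem.List.insertBy, hx, hz]]
    rw [ih (fun y hy => hzs y (by simp [hy]))]

-- the insertion-sort fold on a 0/1-ranked list is the stable partition
theorem pv_fold01 {α : Type} (key : α → Int) (l : List α)
    (h : ∀ x ∈ l, key x = 0 ∨ key x = 1) :
    l.foldl (fun acc x => PySem.List.insertBy (fun a b => decide (key a < key b)) x acc) []
      = l.filter (fun x => key x == 0) ++ l.filter (fun x => key x == 1) := by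
  induction l using List.reverseRecOn with
  | nil => simp
  | append_singleton t x ih =>
    rw [List.foldl_append]
    rw [ih (fun y hy => h y (by simp [hy]))]
    simp only [List.foldl_cons, List.foldl_nil, List.filter_append, List.filter_cons,
      List.filter_nil]
    rcases h x (by simp) with hx | hx
    · rw [pv_insert_zeros_ones key x _ _ hx
        (fun y hy => by simpa using (List.of_mem_filter hy))
        (fun y hy => by have := List.of_mem_filter hy; simpa using this)]
      simp [hx]
    · rw [PySem.List.insertBy_of_forall_not_before]
      · simp [hx]
      · intro y hy
        rcases List.mem_append.mp hy with hm | hm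
        · have := List.of_mem_filter hm
          simp only [beq_iff_eq] at this
          simp [hx, this]
        · have := List.of_mem_filter hm
          simp only [beq_iff_eq] at this
          simp [hx, this]

theorem pv_mem_filter_rank (d : List (String × String)) (l : List (List (String × String)))
    (hd : d ∈ l.filter (fun d => decide (pvRank d < 2))) : pvRank d = 0 ∨ pvRank d = 1 := by
  have h := List.of_mem_filter hd
  simp only [decide_eq_true_eq] at h
  unfold pvRank at h ⊢
  split_ifs at h ⊢ <;> omega

theorem pv_filter_rank0 (l : List (List (String × String))) :
    (l.filter (fun d => decide (pvRank d < 2))).filter (fun x => pvRank x == 0)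
      = l.filter (fun d => PySem.Str.isIn "135" (pvDay d)) := by
  rw [List.filter_filter]
  apply List.filter_congr
  intro d _
  unfold pvRank
  cases h1 : PySem.Str.isIn "135" (pvDay d) <;>
    cases h2 : (PySem.Str.isIn "2" (pvDay d) || PySem.Str.isIn "4" (pvDay d)) <;>
    simp only [h1, h2, Bool.false_eq_true, eq_self_iff_true, if_true, if_false] <;> decide

theorem pv_filter_rank1 (l : List (List (String × String))) :
    (l.filter (fun d => decide (pvRank d < 2))).filter (fun x => pvRank x == 1)
      = l.filter (fun d => !PySem.Str.isIn "135" (pvDay d)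
          && (PySem.Str.isIn "2" (pvDay d) || PySem.Str.isIn "4" (pvDay d))) := by
  rw [List.filter_filter]
  apply List.filter_congr
  intro d _
  unfold pvRank
  cases h1 : PySem.Str.isIn "135" (pvDay d) <;>
    cases h2 : (PySem.Str.isIn "2" (pvDay d) || PySem.Str.isIn "4" (pvDay d)) <;>
    simp only [h1, h2, Bool.false_eq_true, eq_self_iff_true, if_true, if_false] <;> decide

-- ===== VERDICT =====
theorem order_classes_by_day_spec : Claim_equal_order_classes_by_day := by
  intro l _ _
  show order_classes_by_day l = order_classes_by_day_alt l
  unfold order_classes_by_day order_classes_by_day_alt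
  rw [pv_fold_eq (fun d => PySem.Str.isIn "135" (pvDay d))
      (fun d => PySem.Str.isIn "2" (pvDay d) || PySem.Str.isIn "4" (pvDay d)) l [] []]
  rw [PySem.List.sorted_eq_foldl_insertBy]
  rw [pv_fold01 pvRank _ (fun x hx => pv_mem_filter_rank x l hx)]
  rw [pv_filter_rank0, pv_filter_rank1]
  simp
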